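-- pv_equiv track=rewrite | github.com/huanfachen/VeriExCiting | veriexcite.py | extract_bibliography_section
-- ===== SOURCE A (Python) =====
-- from typing import List, Tuple, Dict
--
-- def extract_bibliography_section(text: str, keywords: List[str] = ["Reference", "Bibliography", "Works Cited"]) -> str:
--     """
--     Find the last occurrence of any keyword from 'keywords'
--     and return the text from that point onward.
--     """
--     last_index = -1
--     for keyword in keywords:
--         index = text.lower().rfind(keyword.lower())
--         if index > last_index:
--             last_index = index
--     if last_index == -1:
--         raise ValueError("No bibliography section found using keywords: " + ", ".join(keywords))
--     return text[last_index:]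
-- ===== SOURCE B (Python) =====
-- from typing import List
--
-- def extract_bibliography_section(text: str, keywords: List[str] = ["Reference", "Bibliography", "Works Cited"]) -> str:
--     """
--     Find the last occurrence of any keyword from 'keywords'
--     and return the text from that point onward.
--
--     Enumerate every occurrence of every keyword by stepping forward with
--     str.find, then cut the text at the largest position found.
--     """
--     low = text.lower()
--     occurrences = []
--     for keyword in keywords:
--         k = keyword.lower()
--         pos = low.find(k)
--         while pos != -1:
--             occurrences.append(pos)
--             pos = low.find(k, pos + 1)
--     if not occurrences:
--         raise ValueError("No bibliography section found using keywords: " + ", ".join(keywords))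
--     return text[max(occurrences):]
-- ===== Notes on version B (the rewrite author's own statement) =====
-- stated objective: alternative
-- what changed: Replaces A's per-keyword reverse rfind scan with forward enumeration of every occurrence of every keyword via find-with-start stepping, cutting the text at the largest collected position; Pre_ excludes only the inputs on which A raises ValueError (no keyword occurs in the text).
import Mathlib
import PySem

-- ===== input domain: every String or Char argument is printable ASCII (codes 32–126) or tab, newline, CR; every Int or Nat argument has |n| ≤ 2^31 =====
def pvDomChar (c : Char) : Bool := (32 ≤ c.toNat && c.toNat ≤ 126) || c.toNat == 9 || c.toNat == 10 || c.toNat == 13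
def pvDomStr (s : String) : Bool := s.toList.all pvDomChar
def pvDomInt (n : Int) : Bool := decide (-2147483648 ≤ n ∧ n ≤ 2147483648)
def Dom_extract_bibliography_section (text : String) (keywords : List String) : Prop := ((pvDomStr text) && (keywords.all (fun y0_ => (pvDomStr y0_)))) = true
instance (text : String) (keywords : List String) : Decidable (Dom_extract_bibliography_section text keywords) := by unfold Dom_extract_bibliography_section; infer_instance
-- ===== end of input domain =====

-- B replaces A's per-keyword reverse rfind scan with forward enumeration of all keyword
-- occurrences (find with an advancing start), cutting at the largest collected position
-- (objective: alternative). Where Python raises ValueError both ports return "" (a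
-- totality guard); those inputs are excluded by Pre_.

-- ===== PORT A =====
def extract_bibliography_section (text : String) (keywords : List String) : String :=
  let last_index := keywords.foldl (fun acc kw =>
    let idx := PySem.Str.rfind (PySem.Str.lower text) (PySem.Str.lower kw)
    if idx > acc then idx else acc) (-1)
  if last_index == -1 then "" else PySem.Str.slice text (some last_index) none

-- ===== PORT B =====
/-- B's `while pos != -1` loop: collect `pos`, step to `low.find(k, pos + 1)`.
The fuel argument only makes the loop total; `low.length + 2` bounds the iteration
count (occurrence positions strictly increase within `0..len`). -/
def pvFindAll (low k : List Char) : Nat → Int → List Int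
  | 0, _ => []
  | fuel + 1, pos =>
    if pos = -1 then []
    else pos :: pvFindAll low k fuel (PySem.Chars.findFrom low k (pos + 1))

def extract_bibliography_section_alt (text : String) (keywords : List String) : String :=
  let low := PySem.Str.lower text
  let occurrences := keywords.foldl (fun occ keyword =>
    let k := PySem.Str.lower keyword
    occ ++ pvFindAll low.toList k.toList (low.toList.length + 2)
      (PySem.Chars.find low.toList k.toList)) []
  match PySem.List.max? occurrences id with
  | none => ""
  | some m => PySem.Str.slice text (some m) none

-- ===== PRECONDITION & SPEC =====
-- Pre_ excludes exactly the inputs on which Python A raises ValueError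
-- (no lowercased keyword occurs in the lowercased text).
def Pre_extract_bibliography_section (text : String) (keywords : List String) : Prop :=
  ∃ kw ∈ keywords, PySem.Str.isIn (PySem.Str.lower kw) (PySem.Str.lower text) = true
instance (text : String) (keywords : List String) : Decidable (Pre_extract_bibliography_section text keywords) := by unfold Pre_extract_bibliography_section; infer_instance

def pvWitness_extract_bibliography_section : String × List String :=
  ("Intro.\nReferences\nSmith 2020.", ["Reference", "Bibliography", "Works Cited"])

def Spec_extract_bibliography_section (text : String) (keywords : List String) (out : String) : Prop := out = extract_bibliography_section_alt text keywords
instance (text : String) (keywords : List String) (out : String) : Decidable (Spec_extract_bibliography_section text keywords out) := by unfold Spec_extract_bibliography_section; infer_instance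

-- ===== CLAIM =====
def Claim_equal_extract_bibliography_section : Prop := ∀ (text : String) (keywords : List String), Dom_extract_bibliography_section text keywords → Pre_extract_bibliography_section text keywords → Spec_extract_bibliography_section text keywords (extract_bibliography_section text keywords)

-- ===== LEMMAS AND PROOFS =====

/-- The last `i < m` satisfying `p`, else `-1` (the value of a running last-hit scan). -/
def pvLastHit (p : Nat → Bool) (m : Nat) : Int :=
  (List.range m).foldl (fun acc i => if p i then (i : Int) else acc) (-1)

theorem pvLastHit_succ (p : Nat → Bool) (m : Nat) :
    pvLastHit p (m + 1) = if p m then (m : Int) else pvLastHit p m := by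
  simp [pvLastHit, List.range_succ]

theorem pvLastHit_lt (p : Nat → Bool) (m : Nat) : pvLastHit p m < (m : Int) := by
  induction m with
  | zero => simp [pvLastHit]
  | succ m ih =>
    rw [pvLastHit_succ]
    split <;> push_cast <;> omega

/-- `rfind.go` (backward, first hit) equals the forward last-hit loop. -/
theorem pv_go_eq_lastHit (s sub : List Char) (j : Nat) :
    PySem.Chars.rfind.go s sub j = pvLastHit (fun i => sub.isPrefixOf (s.drop i)) (j + 1) := by
  induction j with
  | zero =>
    rw [PySem.Chars.rfind.go, pvLastHit_succ]
    simp [pvLastHit]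
  | succ j ih =>
    rw [PySem.Chars.rfind.go, pvLastHit_succ, ih]

theorem pv_rfind_eq_lastHit (s sub : List Char) :
    PySem.Chars.rfind s sub = pvLastHit (fun i => sub.isPrefixOf (s.drop i)) (s.length + 1) := by
  rw [PySem.Chars.rfind, pv_go_eq_lastHit]

theorem pv_if_gt_eq_max (a b : Int) : (if b > a then b else a) = max a b := by
  rw [max_def]; split <;> split <;> omega

/-- The last hit is the maximum of the list of hits. -/
theorem pv_lastHit_eq_foldl_max (q : Nat → Bool) (m : Nat) :
    pvLastHit q m =
      (((List.range m).filter q).map (fun i : Nat => (i : Int))).foldl max (-1) := by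
  induction m with
  | zero => simp [pvLastHit]
  | succ m ih =>
    rw [pvLastHit_succ, List.range_succ, List.filter_append]
    by_cases h : q m
    · simp only [h, if_true, List.filter_cons, List.filter_nil, List.map_append,
        List.foldl_append, List.map_cons, List.map_nil, List.foldl_cons, List.foldl_nil]
      rw [← ih]
      have := pvLastHit_lt q m
      omega
    · simp only [h, Bool.false_eq_true, if_false, List.filter_cons, List.filter_nil,
        List.append_nil]
      exact ih

/-- Shift the initial accumulator of a `max`-fold out, for inits above the bottom `-1`. -/
theorem pv_foldl_max_init (l : List Int) (a : Int) (ha : -1 ≤ a) :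
    l.foldl max a = max a (l.foldl max (-1)) := by
  induction l generalizing a with
  | nil => simp; omega
  | cons x t ih =>
    simp only [List.foldl_cons]
    rw [ih (max a x) (by omega), ih (max (-1) x) (by omega)]
    apply le_antisymm <;> simp only [le_max_iff, max_le_iff] <;> omega

/-- The `max` of a concatenation of lists is the `max` of the per-list `max`es. -/
theorem pv_foldl_max_flatten (ls : List (List Int)) :
    ls.flatten.foldl max (-1) =
      (ls.map (fun l => l.foldl max (-1))).foldl max (-1) := by
  induction ls with
  | nil => rfl
  | cons l ls ih =>
    have hge : -1 ≤ l.foldl max (-1) := (PySem.List.le_foldl_max l (-1)).1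
    simp only [List.flatten_cons, List.foldl_append, List.map_cons, List.foldl_cons]
    rw [pv_foldl_max_init _ _ hge, ih, max_eq_right hge, ← pv_foldl_max_init _ _ hge]

theorem pv_findFrom_past (low k : List Char) :
    PySem.Chars.findFrom low k ((low.length : Int) + 1) none = -1 := by
  simp only [PySem.Chars.findFrom]
  have h1 : ¬ ((low.length : Int) + 1 < 0) := by omega
  rw [if_neg h1, if_pos (by omega)]

theorem pv_findFrom_le (low k : List Char) (start : Nat) (h : start ≤ low.length) :
    PySem.Chars.findFrom low k (start : Int) none ≤ (low.length : Int) := by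
  simp only [PySem.Chars.findFrom]
  have h1 : ¬ ((start : Int) < 0) := by omega
  rw [if_neg h1, if_neg (by omega)]
  split
  · omega
  · have := PySem.Chars.find_le_length ((low.take (low.length : Int).toNat).drop (start : Int).toNat) k
    have hlen : ((low.take (low.length : Int).toNat).drop (start : Int).toNat).length
        = low.length - start := by
      simp
    rw [hlen] at this
    omega

/-- Characterisation of B's find-stepping loop: starting the search at `start`,
it collects exactly the positions in `start..low.length` where `k` starts. -/
theorem pv_findAll_spec (low k : List Char) (fuel start : Nat)
    (hstart : start ≤ low.length + 1) (hfuel : low.length + 2 ≤ fuel + start) :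
    pvFindAll low k fuel (PySem.Chars.findFrom low k (start : Int) none) =
      ((List.range' start (low.length + 1 - start)).filter
        (fun i => k.isPrefixOf (low.drop i))).map (fun i : Nat => (i : Int)) := by
  induction fuel generalizing start with
  | zero => omega
  | succ fuel ih =>
    by_cases htop : start = low.length + 1
    · subst htop
      have hpast : PySem.Chars.findFrom low k ((low.length + 1 : Nat) : Int) none = -1 := by
        push_cast
        exact pv_findFrom_past low k
      rw [hpast]
      simp [pvFindAll]
    · have hk : start ≤ low.length := by omega
      by_cases hmiss : PySem.Chars.findFrom low k (start : Int) none = -1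
      · rw [hmiss]
        have hninf := (PySem.Chars.findFrom_natCast_eq_neg_one_iff low k start hk).mp hmiss
        have hfil : ((List.range' start (low.length + 1 - start)).filter
            (fun i => k.isPrefixOf (low.drop i))) = [] := by
          rw [List.filter_eq_nil_iff]
          intro i hi hpref
          rw [List.mem_range'_1] at hi
          refine hninf ?_
          have hdec : low.drop i = (low.drop start).drop (i - start) := by
            rw [List.drop_drop]
            congr 1
            omega
          rw [List.isPrefixOf_iff_prefix, hdec] at hpref
          exact hpref.isInfix.trans (List.drop_suffix _ _).isInfix
        rw [hfil]
        simp [pvFindAll]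
      · obtain ⟨hge, hpref, hmin⟩ := PySem.Chars.findFrom_natCast_spec low k start hk hmiss
        set pos : Int := PySem.Chars.findFrom low k (start : Int) none with hpos
        have hle : pos ≤ (low.length : Int) := pv_findFrom_le low k start hk
        have hposnn : 0 ≤ pos := by omega
        have hposcast : ((pos.toNat : Nat) : Int) = pos := by omega
        rw [pvFindAll, if_neg hmiss]
        have hnext : pos + 1 = ((pos.toNat + 1 : Nat) : Int) := by omega
        rw [hnext, ih (pos.toNat + 1) (by omega) (by omega)]
        -- split the range at pos
        obtain ⟨d, hd⟩ : ∃ d, pos.toNat = start + d := ⟨pos.toNat - start, by omega⟩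
        have hsplit : List.range' start (low.length + 1 - start) =
            List.range' start d ++
              List.range' (start + d) (low.length + 1 - (start + d)) := by
          rw [List.range'_append_1]
          congr 1
          omega
        rw [← hd] at hsplit
        rw [hsplit, List.filter_append]
        have hfil1 : (List.range' start d).filter
            (fun i => k.isPrefixOf (low.drop i)) = [] := by
          rw [List.filter_eq_nil_iff]
          intro i hi hpref'
          rw [List.mem_range'_1] at hi
          exact hmin i hi.1 (by omega) (List.isPrefixOf_iff_prefix.mp hpref')
        have hstep : List.range' pos.toNat (low.length + 1 - pos.toNat) =
            pos.toNat :: List.range' (pos.toNat + 1) (low.length - pos.toNat) := by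
          have h2 : low.length + 1 - pos.toNat = (low.length - pos.toNat) + 1 := by omega
          rw [h2, List.range'_succ]
        have harith : low.length + 1 - (pos.toNat + 1) = low.length - pos.toNat := by omega
        rw [hfil1, hstep, List.nil_append, List.filter_cons,
          if_pos (by simpa [List.isPrefixOf_iff_prefix] using hpref), harith]
        simp only [List.map_cons, hposcast]

theorem pv_max?_go (l : List Int) (a : Int) :
    PySem.List.max? (a :: l) (id : Int → Int) = some (l.foldl max a) := by
  induction l generalizing a with
  | nil => rfl
  | cons x t ih =>
    have h1 : PySem.List.max? (a :: x :: t) (id : Int → Int)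
        = PySem.List.max? (max a x :: t) id := by
      simp only [PySem.List.max?, List.foldl_cons]
      congr 1
      simp only [id_eq]
      rcases lt_or_ge a x with h | h
      · rw [if_pos h, max_eq_right (le_of_lt h)]
      · rw [if_neg (not_lt.mpr h), max_eq_left h]
    rw [h1, ih, List.foldl_cons]

-- ===== VERDICT =====
theorem extract_bibliography_section_spec : Claim_equal_extract_bibliography_section := by
  intro text keywords _ _
  unfold Spec_extract_bibliography_section
  unfold extract_bibliography_section extract_bibliography_section_alt
  set low : List Char := PySem.Chars.lower text.toList with hlow
  set n : Nat := low.length with hn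
  -- the per-keyword occurrence list
  set W : String → List Int := fun kw =>
    ((List.range' 0 (n + 1)).filter
      (fun i => (PySem.Chars.lower kw.toList).isPrefixOf (low.drop i))).map
        (fun i : Nat => (i : Int)) with hW
  -- B's loop produces exactly W kw
  have hloop : ∀ kw : String,
      pvFindAll (PySem.Str.lower text).toList (PySem.Str.lower kw).toList
          ((PySem.Str.lower text).toList.length + 2)
          (PySem.Chars.find (PySem.Str.lower text).toList (PySem.Str.lower kw).toList)
        = W kw := by
    intro kw
    have h0 : PySem.Chars.find (PySem.Str.lower text).toList (PySem.Str.lower kw).toList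
        = PySem.Chars.findFrom (PySem.Str.lower text).toList (PySem.Str.lower kw).toList
            ((0 : Nat) : Int) none := by
      simp
    rw [h0, pv_findAll_spec _ _ _ 0 (by omega) (by simp [PySem.Str.toList_lower, ← hlow, ← hn])]
    simp only [PySem.Str.toList_lower, ← hlow, ← hn, Nat.sub_zero, hW]
  -- B's collected occurrences
  have hocc : keywords.foldl (fun occ keyword =>
      occ ++ pvFindAll (PySem.Str.lower text).toList (PySem.Str.lower keyword).toList
        ((PySem.Str.lower text).toList.length + 2)
        (PySem.Chars.find (PySem.Str.lower text).toList (PySem.Str.lower keyword).toList)) []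
      = (keywords.map W).flatten := by
    rw [PySem.List.foldl_congr_mem keywords _ (fun occ kw => occ ++ W kw) []
      (fun occ kw _ => by rw [hloop kw])]
    rw [PySem.List.foldl_append_eq_flatMap W keywords [], List.nil_append, List.flatMap_def]
  -- elements of the occurrence lists are nonnegative
  have hnonneg : ∀ x ∈ (keywords.map W).flatten, (0 : Int) ≤ x := by
    intro x hx
    obtain ⟨l, hl, hxl⟩ := List.mem_flatten.mp hx
    obtain ⟨kw, _, rfl⟩ := List.mem_map.mp hl
    obtain ⟨i, _, rfl⟩ := List.mem_map.mp hxl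
    omega
  -- A's running maximum equals the maximum of all occurrences
  have hA : keywords.foldl (fun acc kw =>
      let idx := PySem.Str.rfind (PySem.Str.lower text) (PySem.Str.lower kw)
      if idx > acc then idx else acc) (-1)
      = (keywords.map W).flatten.foldl max (-1) := by
    rw [pv_foldl_max_flatten, List.map_map]
    have h1 : ∀ kw : String, (W kw).foldl max (-1)
        = PySem.Str.rfind (PySem.Str.lower text) (PySem.Str.lower kw) := by
      intro kw
      rw [PySem.Str.rfind_eq, PySem.Str.toList_lower, PySem.Str.toList_lower, ← hlow,
        pv_rfind_eq_lastHit, ← hn, pv_lastHit_eq_foldl_max]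
      simp only [hW]
      rw [List.range_eq_range']
    rw [List.foldl_map]
    refine PySem.List.foldl_congr_mem _ _ _ _ (fun acc kw _ => ?_)
    simp only [Function.comp_def, h1, pv_if_gt_eq_max]
  rw [hA]
  simp only [hocc]
  -- compare the two final branches through the shape of the occurrence list
  cases hsh : (keywords.map W).flatten with
  | nil => simp [PySem.List.max?]
  | cons x t =>
    have hx : (0 : Int) ≤ x := hnonneg x (by rw [hsh]; exact List.mem_cons_self)
    have hmax : PySem.List.max? (x :: t) id = some (t.foldl max x) := by
      exact pv_max?_go t x
    have hfold : (x :: t).foldl max (-1) = t.foldl max x := by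
      simp only [List.foldl_cons]
      congr 1
      omega
    have hne : ¬ ((x :: t).foldl max (-1) = -1) := by
      rw [hfold]
      have := (PySem.List.le_foldl_max t x).1
      omega
    have hne' : ¬ (t.foldl max x = -1) := by rw [← hfold]; exact hne
    rw [hmax]
    simp only [beq_iff_eq, hfold, if_neg hne']
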